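-- pv_equiv track=rewrite | github.com/ngopaul/AvalonAI | utils.py | check_list
-- ===== SOURCE A (Python) =====
-- def check_list(lst, MIN, MAX, length, duplicates = True):
--     if len(lst) != length:
--         return False
--     copy = []
--     for item in lst:
--         if item < MIN or item > MAX:
--             return False
--         if not duplicates and item in copy:
--             return False
--         copy.append(item)
--     return True
-- ===== SOURCE B (Python) =====
-- def check_list(lst, MIN, MAX, length, duplicates = True):
--     if len(lst) != length:
--         return False
--     if not all(MIN <= x <= MAX for x in lst):
--         return False
--     if not duplicates and len(set(lst)) != len(lst):
--         return False
--     return True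
-- ===== Notes on version B (the rewrite author's own statement) =====
-- stated objective: simpler
-- what changed: Replaced the fused early-exit loop with an accumulating 'copy' list by three independent checks: length compare, a single bounds pass with all(), and a set-cardinality uniqueness test instead of the quadratic incremental membership scan.
import Mathlib
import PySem

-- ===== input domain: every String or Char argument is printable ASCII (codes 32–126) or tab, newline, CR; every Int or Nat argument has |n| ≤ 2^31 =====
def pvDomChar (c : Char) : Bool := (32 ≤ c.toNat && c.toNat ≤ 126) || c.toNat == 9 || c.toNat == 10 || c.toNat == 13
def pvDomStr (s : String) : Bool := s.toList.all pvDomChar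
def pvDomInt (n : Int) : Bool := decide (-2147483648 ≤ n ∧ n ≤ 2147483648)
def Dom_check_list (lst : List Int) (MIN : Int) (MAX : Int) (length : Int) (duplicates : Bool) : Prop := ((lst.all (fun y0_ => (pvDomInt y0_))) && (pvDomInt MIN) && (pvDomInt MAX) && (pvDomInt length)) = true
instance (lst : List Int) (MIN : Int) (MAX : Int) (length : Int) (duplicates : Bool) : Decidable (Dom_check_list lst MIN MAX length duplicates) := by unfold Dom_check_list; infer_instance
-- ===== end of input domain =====

-- B replaces A's single fused early-exit loop (incremental 'copy' membership) by three
-- independent checks: length compare, one bounds pass, and a set-cardinality uniqueness test.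

-- ===== PORT A =====
-- the 'for item in lst' loop of A, carrying the growing 'copy' list
def checkListLoop (MIN MAX : Int) (duplicates : Bool) : List Int → List Int → Bool
  | [], _ => true
  | item :: rest, copy =>
    if item < MIN || item > MAX then false
    else if !duplicates && copy.contains item then false
    else checkListLoop MIN MAX duplicates rest (copy ++ [item])

def check_list (lst : List Int) (MIN : Int) (MAX : Int) (length : Int) (duplicates : Bool) : Bool :=
  if (lst.length : Int) ≠ length then false
  else checkListLoop MIN MAX duplicates lst []

-- ===== PORT B =====
def check_list_alt (lst : List Int) (MIN : Int) (MAX : Int) (length : Int) (duplicates : Bool) : Bool :=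
  if (lst.length : Int) ≠ length then false
  else if !(lst.all (fun x => MIN ≤ x && x ≤ MAX)) then false
  else if !duplicates && (PySem.Set.ofList lst).length ≠ lst.length then false
  else true

-- ===== PRECONDITION & SPEC =====
def Spec_check_list (lst : List Int) (MIN : Int) (MAX : Int) (length : Int) (duplicates : Bool) (out : Bool) : Prop := out = check_list_alt lst MIN MAX length duplicates
instance (lst : List Int) (MIN : Int) (MAX : Int) (length : Int) (duplicates : Bool) (out : Bool) : Decidable (Spec_check_list lst MIN MAX length duplicates out) := by unfold Spec_check_list; infer_instance

-- ===== CLAIM (what is proved, stated in full; the proofs are below) =====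
def Claim_equal_check_list : Prop := ∀ (lst : List Int) (MIN : Int) (MAX : Int) (length : Int) (duplicates : Bool), Dom_check_list lst MIN MAX length duplicates → Spec_check_list lst MIN MAX length duplicates (check_list lst MIN MAX length duplicates)

-- ===== LEMMAS AND PROOFS =====

-- A's loop, characterised: all elements in bounds, and (if duplicates disallowed)
-- lst nodup and disjoint from the initial copy.
lemma checkListLoop_eq (MIN MAX : Int) (dup : Bool) :
    ∀ (xs copy : List Int),
      checkListLoop MIN MAX dup xs copy =
        (xs.all (fun x => MIN ≤ x && x ≤ MAX) &&
          (dup || decide (xs.Nodup ∧ ∀ x ∈ xs, x ∉ copy))) := by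
  intro xs
  induction xs with
  | nil => intro copy; simp [checkListLoop]
  | cons x rest ih =>
    intro copy
    simp only [checkListLoop]
    by_cases hb : x < MIN ∨ x > MAX
    · have : (x < MIN || x > MAX) = true := by simpa using hb
      rw [if_pos this]
      have : (MIN ≤ x && x ≤ MAX) = false := by
        rcases hb with h | h <;> simp <;> omega
      simp [this]
    · have hbf : (x < MIN || x > MAX) = false := by
        push_neg at hb; simp; omega
      rw [if_neg (by simp [hbf])]
      have hbt : (MIN ≤ x && x ≤ MAX) = true := by
        push_neg at hb; simp; omega
      by_cases hd : !dup && copy.contains x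
      · rw [if_pos hd]
        rcases Bool.and_eq_true_iff.mp hd with ⟨hdup, hmem⟩
        have hdf : dup = false := by cases dup <;> simp_all
        have hx : x ∈ copy := by simpa using hmem
        have hrhs : decide ((x :: rest).Nodup ∧ ∀ y ∈ x :: rest, y ∉ copy) = false := by
          simp only [decide_eq_false_iff_not]
          rintro ⟨-, hall⟩
          exact hall x (by simp) hx
        rw [hdf, hrhs]
        simp
      · rw [if_neg (by simpa using hd)]
        rw [ih (copy ++ [x])]
        cases dup with
        | true => simp [hbt, List.all_cons]
        | false =>
          have hx : x ∉ copy := by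
            simp only [Bool.not_false, Bool.true_and] at hd
            simpa using hd
          simp only [List.all_cons, hbt, Bool.true_and, Bool.false_or]
          congr 1
          simp only [decide_eq_decide, List.nodup_cons, List.mem_append,
            List.mem_cons, List.not_mem_nil, or_false, not_or]
          constructor
          · rintro ⟨hn, hall⟩
            refine ⟨⟨fun hm => ((hall x hm).2 rfl), hn⟩, ?_⟩
            rintro y (rfl | hy)
            · exact hx
            · exact (hall y hy).1
          · rintro ⟨⟨hxr, hn⟩, hall⟩
            exact ⟨hn, fun y hy => ⟨hall y (Or.inr hy), fun h => hxr (h ▸ hy)⟩⟩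

lemma foldl_add_length_le (xs : List Int) : ∀ s : List Int,
    (xs.foldl PySem.Set.add s).length ≤ s.length + xs.length := by
  induction xs with
  | nil => intro s; simp
  | cons y ys ihy =>
    intro s
    simp only [List.foldl_cons]
    calc (ys.foldl PySem.Set.add (PySem.Set.add s y)).length
        ≤ (PySem.Set.add s y).length + ys.length := ihy _
      _ ≤ s.length + (y :: ys).length := by
          have : (PySem.Set.add s y).length ≤ s.length + 1 := by
            simp only [PySem.Set.add]; split <;> simp
          simp only [List.length_cons]; omega

-- len(set(xs)) = len(xs) iff xs has no duplicates (generalised over the fold's accumulator)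
lemma foldl_add_length_eq (xs : List Int) :
    ∀ s : List Int,
      ((xs.foldl PySem.Set.add s).length = s.length + xs.length) ↔
        (xs.Nodup ∧ ∀ x ∈ xs, x ∉ s) := by
  induction xs with
  | nil => intro s; simp
  | cons x rest ih =>
    intro s
    simp only [List.foldl_cons]
    by_cases hx : x ∈ s
    · have hadd : PySem.Set.add s x = s := by
        simp [PySem.Set.add, List.contains_eq_mem, hx]
      rw [hadd]
      constructor
      · intro h
        exfalso
        have hle := foldl_add_length_le rest s
        simp only [List.length_cons] at h; omega
      · rintro ⟨_, hall⟩
        exact absurd hx (hall x (by simp))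
    · have hadd : PySem.Set.add s x = s ++ [x] := by
        simp [PySem.Set.add, List.contains_eq_mem, hx]
      rw [hadd]
      have hnum : (List.length (List.foldl PySem.Set.add (s ++ [x]) rest) = s.length + (x :: rest).length) ↔
          (List.length (List.foldl PySem.Set.add (s ++ [x]) rest) = (s ++ [x]).length + rest.length) := by
        simp only [List.length_append, List.length_cons, List.length_nil]; omega
      rw [hnum, ih (s ++ [x])]
      simp only [List.nodup_cons, List.mem_append, List.mem_cons,
        List.not_mem_nil, or_false, not_or]
      constructor
      · rintro ⟨hn, hall⟩
        refine ⟨⟨fun hm => ((hall x hm).2 rfl), hn⟩, ?_⟩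
        rintro y (rfl | hy)
        · exact hx
        · exact (hall y hy).1
      · rintro ⟨⟨hxr, hn⟩, hall⟩
        exact ⟨hn, fun y hy => ⟨hall y (Or.inr hy), fun h => hxr (h ▸ hy)⟩⟩

lemma ofList_length_eq (xs : List Int) :
    ((PySem.Set.ofList xs).length = xs.length) ↔ xs.Nodup := by
  have := foldl_add_length_eq xs []
  simp only [List.length_nil, Nat.zero_add, List.not_mem_nil] at this
  rw [PySem.Set.ofList_eq_foldl]
  simpa using this

-- ===== VERDICT (by name: the statement is the Claim_ definition above) =====
theorem check_list_spec : Claim_equal_check_list := by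
  intro lst MIN MAX length dup _
  unfold Spec_check_list check_list check_list_alt
  by_cases hlen : (lst.length : Int) ≠ length
  · rw [if_pos hlen, if_pos hlen]
  · rw [if_neg hlen, if_neg hlen]
    rw [checkListLoop_eq]
    simp only [List.not_mem_nil, not_false_iff, implies_true, and_true]
    by_cases hall : lst.all (fun x => MIN ≤ x && x ≤ MAX) = true
    · rw [hall, if_neg (by simp [hall])]
      cases dup with
      | true => simp
      | false =>
        simp only [Bool.not_false, Bool.true_and, Bool.false_or]
        by_cases hnd : (PySem.Set.ofList lst).length = lst.length
        · rw [if_neg (by simpa using hnd)]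
          simp [(ofList_length_eq lst).mp hnd]
        · rw [if_pos (by simpa using hnd)]
          simp
          exact fun h => hnd ((ofList_length_eq lst).mpr h)
    · have : lst.all (fun x => MIN ≤ x && x ≤ MAX) = false := by
        cases h : lst.all (fun x => MIN ≤ x && x ≤ MAX) <;> simp_all
      rw [this, if_pos (by simp [this])]
      simp
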